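-- pv_equiv track=rewrite | github.com/tr1ten/DNA | codility/T1.py | solve
-- ===== SOURCE A (Python) =====
-- def solve(A):
--     A.sort()
--     def ok(x):
--         last = 0
--         cnt = 0
--         for i in range(len(A)):
--             if A[i]-A[last]>x:
--                 last = i
--                 cnt +=1
--         return cnt<=2
--     lo=0
--     hi = 10**10
--     ans = hi
--     while lo<=hi:
--         mid = (lo+hi)//2
--         if ok(mid):
--             hi = mid-1
--             ans = mid
--         else: lo = mid+1
--     return ans
-- ===== SOURCE B (Python) =====
-- def solve(A):
--     # Same in-place sort side effect as the original.
--     A.sort()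
--     n = len(A)
--     if n == 0:
--         return 0
--     best = A[n-1] - A[0]
--     for i in range(n + 1):
--         for j in range(i, n + 1):
--             r1 = A[i-1] - A[0] if i > 0 else 0
--             r2 = A[j-1] - A[i] if j > i else 0
--             r3 = A[n-1] - A[j] if j < n else 0
--             v = max(r1, r2, r3)
--             if v < best:
--                 best = v
--     return best
-- ===== Notes on version B (the rewrite author's own statement) =====
-- stated objective: alternative
-- what changed: Replaces the binary search over the answer with its greedy feasibility check by a direct enumeration of the at-most-two cut points of the sorted array, minimising the max of the three segment ranges.
import Mathlib
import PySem

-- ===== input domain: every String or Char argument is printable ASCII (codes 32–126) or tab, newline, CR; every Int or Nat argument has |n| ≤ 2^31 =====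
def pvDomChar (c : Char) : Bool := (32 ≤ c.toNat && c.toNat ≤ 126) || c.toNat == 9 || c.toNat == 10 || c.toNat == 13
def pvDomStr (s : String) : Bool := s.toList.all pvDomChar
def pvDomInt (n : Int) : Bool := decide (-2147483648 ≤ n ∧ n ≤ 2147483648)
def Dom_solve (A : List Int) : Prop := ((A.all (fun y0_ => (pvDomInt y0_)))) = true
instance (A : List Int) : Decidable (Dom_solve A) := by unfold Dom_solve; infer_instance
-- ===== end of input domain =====

-- B replaces A's binary search over the answer (with its greedy feasibility check) by a direct O(n^2)
-- enumeration of the at-most-two cut points of the sorted array (objective: alternative, not faster).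
-- Both A and B sort the argument list in place in Python; that side effect is identical in A and B,
-- and the equivalence proved here is about the return value.

-- ===== PORT A =====
-- one step of the greedy loop inside ok(x); all list indices are in range, so access is getD
def okStep (S : List Int) (x : Int) (p : Nat × Int) (i : Nat) : Nat × Int :=
  if S.getD i 0 - S.getD p.1 0 > x then (i, p.2 + 1) else p

-- ok(x): greedy break count over all indices must be at most 2
def okA (S : List Int) (x : Int) : Bool :=
  decide ((((List.range S.length).foldl (okStep S x) (0, 0)).2 : Int) ≤ 2)

-- the 'while lo <= hi' binary-search loop
def bs (S : List Int) (lo hi ans : Int) : Int :=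
  if h : lo ≤ hi then
    let mid := PySem.Int.floordiv (lo + hi) 2
    if okA S mid then bs S lo (mid - 1) mid
    else bs S (mid + 1) hi ans
  else ans
termination_by (hi + 1 - lo).toNat
decreasing_by
  · have := PySem.Int.floordiv_two_mid_bounds h; omega
  · have := PySem.Int.floordiv_two_mid_bounds h; omega

def solve (A : List Int) : Int :=
  let S := PySem.List.sorted A (fun v => v) false
  bs S 0 10000000000 10000000000

-- ===== PORT B =====
-- max of the three segment ranges for cut points i ≤ j (segments [0,i), [i,j), [j,n))
def cutVal (S : List Int) (n i j : Nat) : Int :=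
  let r1 := if 0 < i then S.getD (i-1) 0 - S.getD 0 0 else 0
  let r2 := if i < j then S.getD (j-1) 0 - S.getD i 0 else 0
  let r3 := if j < n then S.getD (n-1) 0 - S.getD j 0 else 0
  max r1 (max r2 r3)

def solve_alt (A : List Int) : Int :=
  let S := PySem.List.sorted A (fun v => v) false
  let n := S.length
  if n = 0 then 0
  else
    (List.range (n+1)).foldl (fun best i =>
      (List.range' i (n+1-i)).foldl (fun best j =>
        let v := cutVal S n i j
        if v < best then v else best) best)
      (S.getD (n-1) 0 - S.getD 0 0)

-- ===== PRECONDITION & SPEC =====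
def Spec_solve (A : List Int) (out : Int) : Prop := out = solve_alt A
instance (A : List Int) (out : Int) : Decidable (Spec_solve A out) := by unfold Spec_solve; infer_instance

-- ===== CLAIM (what is proved, stated in full; the proofs are below) =====
def Claim_equal_solve : Prop := ∀ (A : List Int), Dom_solve A → Spec_solve A (solve A)

-- ===== LEMMAS AND PROOFS =====

-- the greedy run after n steps
def grun (S : List Int) (x : Int) (n : Nat) : Nat × Int := (List.range n).foldl (okStep S x) (0, 0)

theorem grun_succ (S : List Int) (x : Int) (n : Nat) :
    grun S x (n+1) = okStep S x (grun S x n) n := by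
  simp [grun, List.range_succ]

theorem okA_eq {S : List Int} {x : Int} : okA S x = true ↔ (grun S x S.length).2 ≤ 2 := by
  simp [okA, grun]

-- sorted lists: getD is monotone on in-range indices
theorem getD_mono (S : List Int) (hs : S.Pairwise (· ≤ ·)) {a b : Nat} (hab : a ≤ b)
    (hb : b < S.length) : S.getD a 0 ≤ S.getD b 0 := by
  rcases Nat.lt_or_eq_of_le hab with h | h
  · have ha : a < S.length := lt_trans h hb
    rw [List.getD_eq_getElem _ _ ha, List.getD_eq_getElem _ _ hb]
    exact List.pairwise_iff_getElem.mp hs a b ha hb h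
  · subst h; exact le_refl _

-- two-run invariant: a larger threshold breaks no more often
theorem run_mono_aux (S : List Int) (hs : S.Pairwise (· ≤ ·)) {x y : Int} (hxy : x ≤ y) :
    ∀ n, n ≤ S.length →
      (grun S x n).1 ≤ n ∧ (grun S y n).1 ≤ n ∧
      (grun S y n).2 ≤ (grun S x n).2 ∧
      ((grun S y n).2 = (grun S x n).2 → (grun S x n).1 ≤ (grun S y n).1) := by
  intro n
  induction n with
  | zero => intro _; exact ⟨le_refl _, le_refl _, le_refl _, fun _ => le_refl _⟩
  | succ n ih =>
    intro hn1
    have hlen : n < S.length := hn1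
    obtain ⟨hx1, hy1, hc, he⟩ := ih (Nat.le_of_lt hlen)
    rw [grun_succ, grun_succ]
    unfold okStep
    by_cases hbx : S.getD n 0 - S.getD (grun S x n).1 0 > x
    · by_cases hby : S.getD n 0 - S.getD (grun S y n).1 0 > y
      · rw [if_pos hbx, if_pos hby]
        refine ⟨?_, ?_, ?_, ?_⟩ <;> dsimp only
        · omega
        · omega
        · omega
        · intro _; exact le_refl _
      · rw [if_pos hbx, if_neg hby]
        refine ⟨?_, ?_, ?_, ?_⟩ <;> dsimp only
        · omega
        · omega
        · omega
        · intro h; omega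
    · by_cases hby : S.getD n 0 - S.getD (grun S y n).1 0 > y
      · by_cases heq : (grun S y n).2 = (grun S x n).2
        · exfalso
          have hle := he heq
          have hSS : S.getD (grun S x n).1 0 ≤ S.getD (grun S y n).1 0 :=
            getD_mono S hs hle (lt_of_le_of_lt hy1 hlen)
          omega
        · rw [if_neg hbx, if_pos hby]
          refine ⟨?_, ?_, ?_, ?_⟩ <;> dsimp only
          · omega
          · omega
          · omega
          · intro h; omega
      · rw [if_neg hbx, if_neg hby]
        exact ⟨by omega, by omega, hc, he⟩

theorem okA_mono (S : List Int) (hs : S.Pairwise (· ≤ ·)) {x y : Int} (hxy : x ≤ y)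
    (hx : okA S x = true) : okA S y = true := by
  rw [okA_eq] at hx ⊢
  obtain ⟨_, _, hc, _⟩ := run_mono_aux S hs hxy S.length (le_refl _)
  omega

-- if every element is within x of the first, the greedy loop never breaks
theorem grun_zero (S : List Int) {x : Int} (h : ∀ k, k < S.length → S.getD k 0 - S.getD 0 0 ≤ x) :
    ∀ n, n ≤ S.length → grun S x n = (0, 0) := by
  intro n
  induction n with
  | zero => intro _; rfl
  | succ n ih =>
    intro hn
    rw [grun_succ, ih (by omega)]
    have := h n (by omega)
    show (if S.getD n 0 - S.getD 0 0 > x then ((n, (0:Int) + 1)) else ((0:Nat), (0:Int))) = ((0:Nat), (0:Int))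
    rw [if_neg (by omega)]

theorem okA_top (A : List Int) (hDom : Dom_solve A) :
    okA (PySem.List.sorted A (fun v => v) false) 10000000000 = true := by
  apply okA_eq.mpr
  set S := PySem.List.sorted A (fun v => v) false with hS
  have hmem : ∀ m, m < S.length → -2147483648 ≤ S.getD m 0 ∧ S.getD m 0 ≤ 2147483648 := by
    intro m hm
    have h1 : S.getD m 0 ∈ S := by
      rw [List.getD_eq_getElem _ _ hm]; exact List.getElem_mem hm
    have hA : S.getD m 0 ∈ A := by
      rw [hS] at h1; exact (PySem.List.mem_sorted _ _ _ _).mp h1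
    unfold Dom_solve at hDom
    have := List.all_eq_true.mp hDom _ hA
    simpa [pvDomInt] using this
  have hall : ∀ k, k < S.length → S.getD k 0 - S.getD 0 0 ≤ 10000000000 := by
    intro k hk
    have h1 := hmem k hk
    have h2 := hmem 0 (by omega)
    omega
  rw [grun_zero S hall S.length (le_refl _)]
  norm_num

-- characterisation of the least feasible threshold
def Ch (S : List Int) (m : Int) : Prop :=
  okA S m = true ∧ 0 ≤ m ∧ ∀ z : Int, 0 ≤ z → z < m → okA S z = false

theorem Ch_unique (S : List Int) {a b : Int} (ha : Ch S a) (hb : Ch S b) : a = b := by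
  obtain ⟨hao, han, hal⟩ := ha
  obtain ⟨hbo, hbn, hbl⟩ := hb
  rcases lt_trichotomy a b with h | h | h
  · have := hbl a han h; rw [hao] at this; cases this
  · exact h
  · have := hal b hbn h; rw [hbo] at this; cases this

-- the binary search returns a least feasible threshold
theorem bs_ch (S : List Int) (hmono : ∀ a b : Int, a ≤ b → okA S a = true → okA S b = true) :
    ∀ lo hi ans : Int, 0 ≤ lo → lo ≤ ans → ans ≤ hi + 1 → okA S ans = true →
      (∀ z : Int, 0 ≤ z → z < lo → okA S z = false) → Ch S (bs S lo hi ans) := by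
  intro lo hi ans
  generalize hk : (hi + 1 - lo).toNat = k
  induction k using Nat.strong_induction_on generalizing lo hi ans with
  | _ k ih =>
  intro h0 hla hah hok hlt
  by_cases hle : lo ≤ hi
  · rw [bs, dif_pos hle]
    have hmb := PySem.Int.floordiv_two_mid_bounds hle
    set mid := PySem.Int.floordiv (lo + hi) 2 with hm
    by_cases hokm : okA S mid = true
    · rw [if_pos hokm]
      exact ih ((mid - 1) + 1 - lo).toNat (by omega) lo (mid - 1) mid rfl
        h0 hmb.1 (by omega) hokm hlt
    · rw [if_neg hokm]
      have hma : mid < ans := by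
        by_contra hcon
        exact hokm (hmono ans mid (by omega) hok)
      refine ih (hi + 1 - (mid + 1)).toNat (by omega) (mid + 1) hi ans rfl
        (by omega) (by omega) (by omega) hok ?_
      intro z hz hzm
      by_cases hzlo : z < lo
      · exact hlt z hz hzlo
      · by_contra hcon
        have : okA S z = true := by
          cases hzz : okA S z
          · exact absurd hzz hcon
          · rfl
        exact hokm (hmono z mid (by omega) this)
  · rw [bs, dif_neg hle]
    exact ⟨hok, by omega, fun z hz hza => hlt z hz (by omega)⟩

theorem solve_Ch (A : List Int) (hDom : Dom_solve A) :
    Ch (PySem.List.sorted A (fun v => v) false) (solve A) := by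
  have hs : (PySem.List.sorted A (fun v => v) false).Pairwise (· ≤ ·) :=
    PySem.List.sorted_pairwise A (fun v => v)
  exact bs_ch (PySem.List.sorted A (fun v => v) false)
    (fun a b hab => okA_mono _ hs hab) 0 10000000000 10000000000
    (le_refl 0) (by norm_num) (by norm_num) (okA_top A hDom)
    (fun z hz hz0 => absurd hz (by omega))

-- cut points with all three ranges ≤ x make the greedy loop break at most twice
theorem grun_of_cuts (S : List Int) (hs : S.Pairwise (· ≤ ·)) {x : Int} {i j : Nat}
    (hij : i ≤ j) (hjn : j ≤ S.length)
    (ha : ∀ t, t < i → S.getD t 0 - S.getD 0 0 ≤ x)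
    (hb : ∀ t, i ≤ t → t < j → S.getD t 0 - S.getD i 0 ≤ x)
    (hc : ∀ t, j ≤ t → t < S.length → S.getD t 0 - S.getD j 0 ≤ x) :
    ∀ n, n ≤ S.length →
      ((grun S x n).2 = 0 ∨ (grun S x n).2 = 1 ∨ (grun S x n).2 = 2) ∧
      (grun S x n).1 ≤ n ∧
      ((grun S x n).2 = 0 → (grun S x n).1 = 0) ∧
      ((grun S x n).2 = 1 → i ≤ (grun S x n).1) ∧
      ((grun S x n).2 = 2 → j ≤ (grun S x n).1) := by
  intro n
  induction n with
  | zero =>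
    intro _
    refine ⟨Or.inl rfl, le_refl _, fun _ => rfl, fun h => ?_, fun h => ?_⟩ <;>
      simp [grun] at h
  | succ n ih =>
    intro hn1
    have hlen : n < S.length := hn1
    obtain ⟨hq, hf, c0, c1, c2⟩ := ih (Nat.le_of_lt hlen)
    rw [grun_succ]
    unfold okStep
    rcases hq with h0 | h1 | h2
    · have hf0 := c0 h0
      by_cases hbr : S.getD n 0 - S.getD (grun S x n).1 0 > x
      · have hin : i ≤ n := by
          by_contra hcon
          have := ha n (by omega)
          rw [hf0] at hbr
          omega
        rw [if_pos hbr]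
        refine ⟨?_, ?_, ?_, ?_, ?_⟩ <;> dsimp only
        · right; left; omega
        · omega
        · intro h; omega
        · intro _; exact hin
        · intro h; omega
      · rw [if_neg hbr]
        exact ⟨Or.inl h0, by omega, c0, c1, c2⟩
    · have hif := c1 h1
      by_cases hbr : S.getD n 0 - S.getD (grun S x n).1 0 > x
      · have hSi : S.getD i 0 ≤ S.getD (grun S x n).1 0 :=
          getD_mono S hs hif (lt_of_le_of_lt hf hlen)
        have hjnn : j ≤ n := by
          by_contra hcon
          have := hb n (by omega) (by omega)
          omega
        rw [if_pos hbr]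
        refine ⟨?_, ?_, ?_, ?_, ?_⟩ <;> dsimp only
        · right; right; omega
        · omega
        · intro h; omega
        · intro h; omega
        · intro _; exact hjnn
      · rw [if_neg hbr]
        exact ⟨Or.inr (Or.inl h1), by omega, c0, c1, c2⟩
    · have hjf := c2 h2
      have hSj : S.getD j 0 ≤ S.getD (grun S x n).1 0 :=
        getD_mono S hs hjf (lt_of_le_of_lt hf hlen)
      have := hc n (by omega) hlen
      rw [if_neg (by omega)]
      exact ⟨Or.inr (Or.inr h2), by omega, c0, c1, c2⟩

theorem okA_of_cutVal (S : List Int) (hs : S.Pairwise (· ≤ ·)) {i j : Nat}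
    (hij : i ≤ j) (hjn : j ≤ S.length) : okA S (cutVal S S.length i j) = true := by
  have hr1 : (if 0 < i then S.getD (i-1) 0 - S.getD 0 0 else 0) ≤ cutVal S S.length i j := by
    simp only [cutVal]; exact le_max_left _ _
  have hr2 : (if i < j then S.getD (j-1) 0 - S.getD i 0 else 0) ≤ cutVal S S.length i j := by
    simp only [cutVal]; exact le_trans (le_max_left _ _) (le_max_right _ _)
  have hr3 : (if j < S.length then S.getD (S.length-1) 0 - S.getD j 0 else 0) ≤ cutVal S S.length i j := by
    simp only [cutVal]; exact le_trans (le_max_right _ _) (le_max_right _ _)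
  have ha : ∀ t, t < i → S.getD t 0 - S.getD 0 0 ≤ cutVal S S.length i j := by
    intro t ht
    have hi : 0 < i := by omega
    rw [if_pos hi] at hr1
    have : S.getD t 0 ≤ S.getD (i-1) 0 := getD_mono S hs (by omega) (by omega)
    omega
  have hb : ∀ t, i ≤ t → t < j → S.getD t 0 - S.getD i 0 ≤ cutVal S S.length i j := by
    intro t hit htj
    have hj : i < j := by omega
    rw [if_pos hj] at hr2
    have h1 : S.getD t 0 ≤ S.getD (j-1) 0 := getD_mono S hs (by omega) (by omega)
    have h2 : S.getD i 0 ≤ S.getD t 0 := getD_mono S hs (by omega) (by omega)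
    omega
  have hc : ∀ t, j ≤ t → t < S.length → S.getD t 0 - S.getD j 0 ≤ cutVal S S.length i j := by
    intro t hjt htn
    have hjl : j < S.length := by omega
    rw [if_pos hjl] at hr3
    have h1 : S.getD t 0 ≤ S.getD (S.length-1) 0 := getD_mono S hs (by omega) (by omega)
    have h2 : S.getD j 0 ≤ S.getD t 0 := getD_mono S hs (by omega) (by omega)
    omega
  apply okA_eq.mpr
  obtain ⟨hq, -, -, -, -⟩ := grun_of_cuts S hs hij hjn ha hb hc S.length (le_refl _)
  rcases hq with h | h | h <;> omega

theorem cutVal_nonneg (S : List Int) (hs : S.Pairwise (· ≤ ·)) {i j : Nat}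
    (hij : i ≤ j) (hjn : j ≤ S.length) : 0 ≤ cutVal S S.length i j := by
  by_cases hi : 0 < i
  · have h1 : S.getD 0 0 ≤ S.getD (i-1) 0 := getD_mono S hs (by omega) (by omega)
    have h2 : (if 0 < i then S.getD (i-1) 0 - S.getD 0 0 else 0) ≤ cutVal S S.length i j := by
      simp only [cutVal]; exact le_max_left _ _
    rw [if_pos hi] at h2
    omega
  · by_cases hj : i < j
    · have h1 : S.getD i 0 ≤ S.getD (j-1) 0 := getD_mono S hs (by omega) (by omega)
      have h2 : (if i < j then S.getD (j-1) 0 - S.getD i 0 else 0) ≤ cutVal S S.length i j := by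
        simp only [cutVal]; exact le_trans (le_max_left _ _) (le_max_right _ _)
      rw [if_pos hj] at h2
      omega
    · by_cases hjl : j < S.length
      · have h1 : S.getD j 0 ≤ S.getD (S.length-1) 0 := getD_mono S hs (by omega) (by omega)
        have h2 : (if j < S.length then S.getD (S.length-1) 0 - S.getD j 0 else 0) ≤ cutVal S S.length i j := by
          simp only [cutVal]; exact le_trans (le_max_right _ _) (le_max_right _ _)
        rw [if_pos hjl] at h2
        omega
      · simp only [cutVal, if_neg hi, if_neg hj, if_neg hjl]
        decide

-- invariant for extracting the break points of a feasible greedy run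
theorem cuts_inv (S : List Int) {x : Int} (hx : 0 ≤ x) :
    ∀ n, n ≤ S.length →
      (grun S x n).1 ≤ n ∧
      (2 < (grun S x n).2 ∨
        (((grun S x n).2 = 0 ∨ (grun S x n).2 = 1 ∨ (grun S x n).2 = 2) ∧
         ((grun S x n).2 = 0 → (grun S x n).1 = 0 ∧ ∀ t, t < n → S.getD t 0 - S.getD 0 0 ≤ x) ∧
         ((grun S x n).2 = 1 → (∀ t, t < (grun S x n).1 → S.getD t 0 - S.getD 0 0 ≤ x) ∧
            (∀ t, (grun S x n).1 ≤ t → t < n → S.getD t 0 - S.getD (grun S x n).1 0 ≤ x)) ∧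
         ((grun S x n).2 = 2 → ∃ b, b ≤ (grun S x n).1 ∧
            (∀ t, t < b → S.getD t 0 - S.getD 0 0 ≤ x) ∧
            (∀ t, b ≤ t → t < (grun S x n).1 → S.getD t 0 - S.getD b 0 ≤ x) ∧
            (∀ t, (grun S x n).1 ≤ t → t < n → S.getD t 0 - S.getD (grun S x n).1 0 ≤ x)))) := by
  intro n
  induction n with
  | zero =>
    intro _
    refine ⟨le_refl _, Or.inr ⟨Or.inl rfl, fun _ => ⟨rfl, fun t ht => absurd ht (by omega)⟩,
      fun h => ?_, fun h => ?_⟩⟩ <;> simp [grun] at h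
  | succ n ih =>
    intro hn1
    have hlen : n < S.length := hn1
    obtain ⟨hf, hrest⟩ := ih (Nat.le_of_lt hlen)
    rw [grun_succ]
    unfold okStep
    rcases hrest with hgt | ⟨hq, c0, c1, c2⟩
    · by_cases hbr : S.getD n 0 - S.getD (grun S x n).1 0 > x
      · rw [if_pos hbr]
        exact ⟨by dsimp only; omega, Or.inl (by dsimp only; omega)⟩
      · rw [if_neg hbr]
        exact ⟨by omega, Or.inl hgt⟩
    · rcases hq with h0 | h1 | h2
      · obtain ⟨hf0, hall⟩ := c0 h0
        by_cases hbr : S.getD n 0 - S.getD (grun S x n).1 0 > x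
        · rw [if_pos hbr]
          refine ⟨by dsimp only; omega, Or.inr ⟨by dsimp only; omega, fun h => ?_, fun _ => ?_, fun h => ?_⟩⟩
          · dsimp only at h; omega
          · dsimp only
            refine ⟨hall, fun t ht1 ht2 => ?_⟩
            have : t = n := by omega
            subst this
            omega
          · dsimp only at h; omega
        · rw [if_neg hbr]
          rw [hf0] at hbr
          refine ⟨by omega, Or.inr ⟨Or.inl h0, fun _ => ⟨hf0, fun t ht => ?_⟩,
            fun h => (False.elim (by omega)), fun h => (False.elim (by omega))⟩⟩
          rcases Nat.lt_or_ge t n with h | h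
          · exact hall t h
          · have : t = n := by omega
            subst this
            omega
      · obtain ⟨hpre, hcur⟩ := c1 h1
        by_cases hbr : S.getD n 0 - S.getD (grun S x n).1 0 > x
        · rw [if_pos hbr]
          refine ⟨by dsimp only; omega, Or.inr ⟨by dsimp only; omega, fun h => ?_, fun h => ?_, fun _ => ?_⟩⟩
          · dsimp only at h; omega
          · dsimp only at h; omega
          · dsimp only
            refine ⟨(grun S x n).1, hf, hpre, hcur, fun t ht1 ht2 => ?_⟩
            have : t = n := by omega
            subst this
            omega
        · rw [if_neg hbr]
          refine ⟨by omega, Or.inr ⟨Or.inr (Or.inl h1), fun h => (False.elim (by omega)),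
            fun _ => ⟨hpre, fun t ht1 ht2 => ?_⟩, fun h => (False.elim (by omega))⟩⟩
          rcases Nat.lt_or_ge t n with h | h
          · exact hcur t ht1 h
          · have : t = n := by omega
            subst this
            omega
      · obtain ⟨b, hb1, hb2, hb3, hb4⟩ := c2 h2
        by_cases hbr : S.getD n 0 - S.getD (grun S x n).1 0 > x
        · rw [if_pos hbr]
          exact ⟨by dsimp only; omega, Or.inl (by dsimp only; omega)⟩
        · rw [if_neg hbr]
          refine ⟨by omega, Or.inr ⟨Or.inr (Or.inr h2), fun h => (False.elim (by omega)),
            fun h => (False.elim (by omega)),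
            fun _ => ⟨b, hb1, hb2, hb3, fun t ht1 ht2 => ?_⟩⟩⟩
          rcases Nat.lt_or_ge t n with h | h
          · exact hb4 t ht1 h
          · have : t = n := by omega
            subst this
            omega

-- a cutVal is at most x as soon as each of its three components is
theorem cutVal_le (S : List Int) (n i j : Nat) {x : Int} (hx : 0 ≤ x)
    (h1 : 0 < i → S.getD (i-1) 0 - S.getD 0 0 ≤ x)
    (h2 : i < j → S.getD (j-1) 0 - S.getD i 0 ≤ x)
    (h3 : j < n → S.getD (n-1) 0 - S.getD j 0 ≤ x) : cutVal S n i j ≤ x := by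
  simp only [cutVal]
  refine max_le ?_ (max_le ?_ ?_)
  · by_cases hi : 0 < i
    · rw [if_pos hi]; exact h1 hi
    · rw [if_neg hi]; exact hx
  · by_cases hj : i < j
    · rw [if_pos hj]; exact h2 hj
    · rw [if_neg hj]; exact hx
  · by_cases hjl : j < n
    · rw [if_pos hjl]; exact h3 hjl
    · rw [if_neg hjl]; exact hx

-- from a feasible threshold, extract cut points whose value is at most the threshold
theorem cuts_of_okA (S : List Int) {x : Int} (hx : 0 ≤ x) (hok : okA S x = true) :
    ∃ i j, i ≤ j ∧ j ≤ S.length ∧ cutVal S S.length i j ≤ x := by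
  have hok2 := okA_eq.mp hok
  obtain ⟨hf, hrest⟩ := cuts_inv S hx S.length (le_refl _)
  rcases hrest with hgt | ⟨hq, c0, c1, c2⟩
  · omega
  · rcases hq with h0 | h1 | h2
    · obtain ⟨_, hall⟩ := c0 h0
      refine ⟨S.length, S.length, le_refl _, le_refl _, cutVal_le S S.length _ _ hx ?_ ?_ ?_⟩
      · intro hi; exact hall _ (by omega)
      · intro h; omega
      · intro h; omega
    · obtain ⟨hpre, hcur⟩ := c1 h1
      refine ⟨(grun S x S.length).1, S.length, hf, le_refl _,
        cutVal_le S S.length _ _ hx ?_ ?_ ?_⟩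
      · intro hi; exact hpre _ (by omega)
      · intro hj; exact hcur _ (by omega) (by omega)
      · intro h; omega
    · obtain ⟨b, hb1, hb2, hb3, hb4⟩ := c2 h2
      refine ⟨b, (grun S x S.length).1, hb1, hf,
        cutVal_le S S.length _ _ hx ?_ ?_ ?_⟩
      · intro hi; exact hb2 _ (by omega)
      · intro hj; exact hb3 _ (by omega) (by omega)
      · intro hjl; exact hb4 _ (by omega) (by omega)

-- folding min
theorem foldl_min_le_init (l : List Int) (a : Int) : l.foldl min a ≤ a := by
  induction l generalizing a with
  | nil => exact le_refl a
  | cons b l ih => exact le_trans (ih (min a b)) (min_le_left a b)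

theorem foldl_min_le_mem (l : List Int) : ∀ (a b : Int), b ∈ l → l.foldl min a ≤ b := by
  induction l with
  | nil => intro a b hb; cases hb
  | cons c l ih =>
    intro a b hb
    rcases List.mem_cons.mp hb with h | h
    · subst h
      exact le_trans (foldl_min_le_init l _) (min_le_right a b)
    · exact ih (min a c) b h

theorem foldl_min_attained (l : List Int) : ∀ a : Int, l.foldl min a = a ∨ l.foldl min a ∈ l := by
  induction l with
  | nil => intro a; exact Or.inl rfl
  | cons c l ih =>
    intro a
    rcases ih (min a c) with h | h
    · rcases le_total a c with hac | hac
      · left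
        rw [List.foldl_cons, h, min_eq_left hac]
      · right
        rw [show (c :: l).foldl min a = c from by rw [List.foldl_cons, h, min_eq_right hac]]
        exact List.mem_cons_self
    · right
      rw [List.foldl_cons]
      exact List.mem_cons_of_mem c h

theorem foldl_foldl_min (L : Nat → List Int) (l : List Nat) (init : Int) :
    l.foldl (fun b i => (L i).foldl min b) init = (l.flatMap L).foldl min init := by
  induction l generalizing init with
  | nil => rfl
  | cons a l ih => simp [List.flatMap_cons, List.foldl_append, ih]

theorem if_lt_min (a b : Int) : (if b < a then b else a) = min a b := by
  rw [min_def]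
  split_ifs <;> omega

-- the candidate list of B: all cut values
def Cands (S : List Int) (n : Nat) : List Int :=
  (List.range (n+1)).flatMap (fun i => (List.range' i (n+1-i)).map (cutVal S n i))

theorem mem_Cands {S : List Int} {n : Nat} {v : Int} :
    v ∈ Cands S n ↔ ∃ i j, i ≤ j ∧ j ≤ n ∧ v = cutVal S n i j := by
  simp only [Cands, List.mem_flatMap, List.mem_map, List.mem_range, List.mem_range'_1]
  constructor
  · rintro ⟨i, hi, j, ⟨hij, hj⟩, rfl⟩
    exact ⟨i, j, hij, by omega, rfl⟩
  · rintro ⟨i, j, hij, hjn, rfl⟩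
    exact ⟨i, by omega, j, ⟨hij, by omega⟩, rfl⟩

theorem solve_alt_eq (A : List Int)
    (hn : (PySem.List.sorted A (fun v => v) false).length ≠ 0) :
    solve_alt A = (Cands (PySem.List.sorted A (fun v => v) false)
        (PySem.List.sorted A (fun v => v) false).length).foldl min
      ((PySem.List.sorted A (fun v => v) false).getD
          ((PySem.List.sorted A (fun v => v) false).length - 1) 0 -
        (PySem.List.sorted A (fun v => v) false).getD 0 0) := by
  set S := PySem.List.sorted A (fun v => v) false with hS
  set n := S.length with hnn
  show (if n = 0 then 0 else
      (List.range (n+1)).foldl (fun best i =>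
        (List.range' i (n+1-i)).foldl (fun best j =>
          let v := cutVal S n i j
          if v < best then v else best) best)
        (S.getD (n-1) 0 - S.getD 0 0)) = _
  rw [if_neg hn]
  have h1 : (fun (best : Int) (i : Nat) =>
      (List.range' i (n+1-i)).foldl (fun best j =>
        let v := cutVal S n i j
        if v < best then v else best) best)
      = fun (best : Int) (i : Nat) =>
        ((List.range' i (n+1-i)).map (cutVal S n i)).foldl min best := by
    funext best i
    rw [List.foldl_map]
    have h2 : (fun (best : Int) (j : Nat) =>
        let v := cutVal S n i j
        if v < best then v else best)
        = fun (best : Int) (j : Nat) => min best (cutVal S n i j) := by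
      funext b j
      exact if_lt_min b (cutVal S n i j)
    rw [h2]
  rw [h1, foldl_foldl_min]
  rfl

theorem solve_alt_Ch (A : List Int) :
    Ch (PySem.List.sorted A (fun v => v) false) (solve_alt A) := by
  set S := PySem.List.sorted A (fun v => v) false with hS
  have hs : S.Pairwise (· ≤ ·) := PySem.List.sorted_pairwise A (fun v => v)
  by_cases hn : S.length = 0
  · have hz : solve_alt A = 0 := by
      show (if S.length = 0 then (0:Int) else _) = 0
      rw [if_pos hn]
    rw [hz]
    refine ⟨okA_eq.mpr ?_, le_refl 0, fun z hz0 hzlt => absurd hzlt (by omega)⟩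
    rw [hn]
    simp [grun]
  · rw [solve_alt_eq A hn]
    set init := S.getD (S.length - 1) 0 - S.getD 0 0 with hinit
    set m := (Cands S S.length).foldl min init with hm
    have hminit : m ≤ init := foldl_min_le_init _ _
    have hmemle : ∀ c ∈ Cands S S.length, m ≤ c := fun c hc => foldl_min_le_mem _ init c hc
    have hinit_eq : init = cutVal S S.length S.length S.length := by
      have h1 : S.getD 0 0 ≤ S.getD (S.length - 1) 0 := getD_mono S hs (by omega) (by omega)
      simp only [cutVal]
      rw [if_pos (show 0 < S.length by omega), if_neg (lt_irrefl S.length),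
        max_self, max_eq_left (by omega : (0:Int) ≤ S.getD (S.length - 1) 0 - S.getD 0 0)]
    obtain ⟨i, j, hij, hjn, hmv⟩ : ∃ i j, i ≤ j ∧ j ≤ S.length ∧ m = cutVal S S.length i j := by
      rcases foldl_min_attained (Cands S S.length) init with h | h
      · rw [← hm] at h
        exact ⟨S.length, S.length, le_refl _, le_refl _, h.trans hinit_eq⟩
      · obtain ⟨i, j, hij, hjn, he⟩ := mem_Cands.mp h
        exact ⟨i, j, hij, hjn, he⟩
    refine ⟨?_, ?_, ?_⟩
    · rw [hmv]
      exact okA_of_cutVal S hs hij hjn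
    · rw [hmv]
      exact cutVal_nonneg S hs hij hjn
    · intro z hz0 hzm
      cases hzz : okA S z
      · rfl
      · exfalso
        obtain ⟨i', j', hij', hj'n, hcv⟩ := cuts_of_okA S hz0 hzz
        have hle := hmemle _ (mem_Cands.mpr ⟨i', j', hij', hj'n, rfl⟩)
        omega

-- ===== VERDICT (by name: the statement is the Claim_ definition above) =====
theorem solve_spec : Claim_equal_solve := by
  intro A hDom
  unfold Spec_solve
  exact Ch_unique _ (solve_Ch A hDom) (solve_alt_Ch A)
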